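-- pv_equiv track=rewrite | github.com/ivg-design/orchestrator | orchestrator/utils.py | get_latest_event_by_type
-- ===== SOURCE A (Python) =====
-- from typing import Any, Dict, List, Optional
--
-- def get_latest_event_by_type(
--     events: List[Dict[str, Any]],
--     event_type: str
-- ) -> Optional[Dict[str, Any]]:
--     """Get the most recent event of a specific type."""
--     for event in reversed(events):
--         if event.get("type") == event_type:
--             return event
--     return None
-- ===== SOURCE B (Python) =====
-- from typing import Any, Dict, List, Optional
--
-- def get_latest_event_by_type(
--     events: List[Dict[str, Any]],
--     event_type: str
-- ) -> Optional[Dict[str, Any]]: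
--     """Get the most recent event of a specific type (forward pass, last match wins)."""
--     result = None
--     for event in events:
--         if event.get("type") == event_type:
--             result = event
--     return result
-- ===== Notes on version B (the rewrite author's own statement) =====
-- stated objective: alternative
-- what changed: Replaced the reversed() scan with early return by a forward fold that overwrites an accumulator on each match and returns it after the full pass (last-wins).
import Mathlib
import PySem

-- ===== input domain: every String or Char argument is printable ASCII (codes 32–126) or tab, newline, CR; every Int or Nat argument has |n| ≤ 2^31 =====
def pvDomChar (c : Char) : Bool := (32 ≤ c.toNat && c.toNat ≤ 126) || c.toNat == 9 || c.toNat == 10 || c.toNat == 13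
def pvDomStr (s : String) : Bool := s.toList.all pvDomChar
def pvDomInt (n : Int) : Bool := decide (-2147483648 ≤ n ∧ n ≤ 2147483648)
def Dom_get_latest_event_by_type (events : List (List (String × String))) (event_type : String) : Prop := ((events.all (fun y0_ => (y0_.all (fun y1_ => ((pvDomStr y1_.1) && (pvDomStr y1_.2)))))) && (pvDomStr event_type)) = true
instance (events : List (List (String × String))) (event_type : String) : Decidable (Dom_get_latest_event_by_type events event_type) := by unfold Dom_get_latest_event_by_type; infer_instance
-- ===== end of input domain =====

-- B differs from A by scanning forward and keeping the last match instead of scanning reversed with an early return (objective: alternative decomposition, same output by last-wins semantics).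

-- ===== PORT A =====
-- A: for event in reversed(events): if event.get("type") == event_type: return event; return None
def pvScanRevA (event_type : String) : List (List (String × String)) → Option (List (String × String))
  | [] => none
  | event :: rest =>
    if (PySem.Dict.mk event).get? "type" == some event_type then some event
    else pvScanRevA event_type rest

def get_latest_event_by_type (events : List (List (String × String))) (event_type : String) : Option (List (String × String)) :=
  pvScanRevA event_type events.reverse

-- ===== PORT B =====
-- B: result = None; for event in events: if event.get("type") == event_type: result = event; return result
def get_latest_event_by_type_alt (events : List (List (String × String))) (event_type : String) : Option (List (String × String)) :=
  events.foldl
    (fun result event =>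
      if (PySem.Dict.mk event).get? "type" == some event_type then some event else result)
    none

-- ===== PRECONDITION & SPEC =====
def Spec_get_latest_event_by_type (events : List (List (String × String))) (event_type : String) (out : Option (List (String × String))) : Prop := out = get_latest_event_by_type_alt events event_type
instance (events : List (List (String × String))) (event_type : String) (out : Option (List (String × String))) : Decidable (Spec_get_latest_event_by_type events event_type out) := by unfold Spec_get_latest_event_by_type; infer_instance

-- ===== CLAIM (what is proved, stated in full; the proofs are below) =====
def Claim_equal_get_latest_event_by_type : Prop := ∀ (events : List (List (String × String))) (event_type : String), Dom_get_latest_event_by_type events event_type → Spec_get_latest_event_by_type events event_type (get_latest_event_by_type events event_type)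

-- ===== LEMMAS AND PROOFS =====

-- First match in (m ++ [x]) is: first match in m, else x if it matches.
theorem pvScanRevA_append_singleton (et : String) (m : List (List (String × String))) (x : List (String × String)) :
    pvScanRevA et (m ++ [x]) =
      match pvScanRevA et m with
      | some e => some e
      | none => if (PySem.Dict.mk x).get? "type" == some et then some x else none := by
  induction m with
  | nil => simp [pvScanRevA]
  | cons h t ih =>
    by_cases hm : ((PySem.Dict.mk h).get? "type" == some et) = true <;>
      simp [pvScanRevA, hm, ih]

-- Loop invariant for B's forward fold.
theorem foldl_eq_scanRev (et : String) (l : List (List (String × String))) (acc : Option (List (String × String))) :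
    l.foldl (fun result event =>
        if (PySem.Dict.mk event).get? "type" == some et then some event else result) acc =
      match pvScanRevA et l.reverse with
      | some e => some e
      | none => acc := by
  induction l generalizing acc with
  | nil => simp [pvScanRevA]
  | cons h t ih =>
    simp only [List.foldl_cons, List.reverse_cons]
    rw [ih, pvScanRevA_append_singleton]
    cases pvScanRevA et t.reverse <;> by_cases hm : ((PySem.Dict.mk h).get? "type" == some et) = true <;>
      simp [hm]

-- ===== VERDICT (by name: the statement is the Claim_ definition above) =====
theorem get_latest_event_by_type_spec : Claim_equal_get_latest_event_by_type := by
  intro events event_type _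
  unfold Spec_get_latest_event_by_type get_latest_event_by_type get_latest_event_by_type_alt
  rw [foldl_eq_scanRev]
  cases pvScanRevA event_type events.reverse <;> rfl
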